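-- pv_equiv track=rewrite | github.com/GeertenRijsdijk/SIT_analogies | complexity_metrics.py | P_load
-- ===== SOURCE A (Python) =====
-- def P_load(string):
--     load = 0
--     for i, c in enumerate(string):
--         if c.isalpha() and c != 'S':
--             load += 1
--         elif c == 'S' and (i == len(string)-1 or not string[i+1] == '['):
--             load += 1
--         elif c.isdigit() and (i == len(string)-1 or not string[i+1] == '*'):
--             load += 1
--     return load
-- ===== SOURCE B (Python) =====
-- def P_load(string):
--     letters = sum(c.isalpha() for c in string)
--     digits = sum(c.isdigit() for c in string)
--     pairs = list(zip(string, string[1:]))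
--     s_bracket = sum(a == 'S' and b == '[' for a, b in pairs)
--     digit_star = sum(a.isdigit() and b == '*' for a, b in pairs)
--     return letters + digits - s_bracket - digit_star
-- ===== Notes on version B (the rewrite author's own statement) =====
-- stated objective: alternative
-- what changed: Replaces the indexed loop with per-character lookahead branches by four independent aggregate counts (alphabetic chars, digit chars, S-followed-by-open-bracket adjacencies, digit-followed-by-asterisk adjacencies over zipped neighbour pairs) combined arithmetically.
import Mathlib
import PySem

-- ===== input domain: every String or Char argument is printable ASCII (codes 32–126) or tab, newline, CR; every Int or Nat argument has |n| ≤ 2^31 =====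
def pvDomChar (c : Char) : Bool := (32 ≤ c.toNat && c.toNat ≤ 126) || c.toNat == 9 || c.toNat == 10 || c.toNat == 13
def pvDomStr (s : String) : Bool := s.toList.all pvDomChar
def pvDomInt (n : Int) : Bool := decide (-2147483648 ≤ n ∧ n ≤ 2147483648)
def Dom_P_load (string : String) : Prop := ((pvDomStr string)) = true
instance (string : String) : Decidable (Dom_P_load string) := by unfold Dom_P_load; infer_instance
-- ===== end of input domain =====

-- B replaces A's indexed loop with per-character lookahead branches by four independent
-- aggregate counts combined arithmetically (alternative decomposition, same cost).

-- ===== PORT A =====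
def P_load (string : String) : Int :=
  (PySem.List.enumerate string.toList).foldl (fun load p =>
    if PySem.Chars.isalpha p.2 && !(p.2 == 'S') then load + 1
    else if p.2 == 'S' &&
        (p.1 == PySem.Str.len string - 1 ||
         !(PySem.List.pyGet? string.toList (p.1 + 1) == some '[')) then load + 1
    else if PySem.Chars.isdigit p.2 &&
        (p.1 == PySem.Str.len string - 1 ||
         !(PySem.List.pyGet? string.toList (p.1 + 1) == some '*')) then load + 1
    else load) 0

-- ===== PORT B =====
def P_load_alt (string : String) : Int :=
  let s := string.toList
  let letters : Int := s.countP (fun c => PySem.Chars.isalpha c)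
  let digits : Int := s.countP (fun c => PySem.Chars.isdigit c)
  let pairs := s.zip s.tail
  let sBracket : Int := pairs.countP (fun p => p.1 == 'S' && p.2 == '[')
  let digitStar : Int := pairs.countP (fun p => PySem.Chars.isdigit p.1 && p.2 == '*')
  letters + digits - sBracket - digitStar

-- ===== PRECONDITION & SPEC =====
def Spec_P_load (string : String) (out : Int) : Prop := out = P_load_alt string
instance (string : String) (out : Int) : Decidable (Spec_P_load string out) := by unfold Spec_P_load; infer_instance

-- ===== CLAIM (what is proved, stated in full; the proofs are below) =====
def Claim_equal_P_load : Prop := ∀ (string : String), Dom_P_load string → Spec_P_load string (P_load string)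

-- ===== LEMMAS AND PROOFS =====

-- A's per-character contribution, as a function of the character and the (optional) next character.
def pvContrib (c : Char) (next : Option Char) : Int :=
  if PySem.Chars.isalpha c && !(c == 'S') then 1
  else if c == 'S' && !(next == some '[') then 1
  else if PySem.Chars.isdigit c && !(next == some '*') then 1
  else 0

-- Sum of contributions of every character paired with its successor (none at the end).
def pvZipSum (s : List Char) : Int :=
  ((s.zip (s.tail.map some ++ [none])).map (fun p => pvContrib p.1 p.2)).sum

-- A's fold body, parameterised by the full character list.
def pvF (s : List Char) (load : Int) (p : Int × Char) : Int :=
  if PySem.Chars.isalpha p.2 && !(p.2 == 'S') then load + 1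
  else if p.2 == 'S' &&
      (p.1 == (s.length : Int) - 1 ||
       !(PySem.List.pyGet? s (p.1 + 1) == some '[')) then load + 1
  else if PySem.Chars.isdigit p.2 &&
      (p.1 == (s.length : Int) - 1 ||
       !(PySem.List.pyGet? s (p.1 + 1) == some '*')) then load + 1
  else load

lemma pvAlpha_not_digit (c : Char) (h : PySem.Chars.isalpha c = true) :
    PySem.Chars.isdigit c = false := by
  simp [PySem.Chars.isalpha, PySem.Chars.isupper, PySem.Chars.islower,
        PySem.Chars.isdigit, Char.le_def, UInt32.le_iff_toNat_le] at *
  omega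

lemma pvContrib_split (c : Char) (next : Option Char) :
    pvContrib c next =
      (if PySem.Chars.isalpha c then (1:Int) else 0) +
      (if PySem.Chars.isdigit c then (1:Int) else 0) -
      (if c == 'S' && next == some '[' then (1:Int) else 0) -
      (if PySem.Chars.isdigit c && next == some '*' then (1:Int) else 0) := by
  by_cases hc : c = 'S'
  · subst hc
    have h1 : PySem.Chars.isalpha 'S' = true := by decide
    have h2 : PySem.Chars.isdigit 'S' = false := by decide
    cases next <;> simp [pvContrib, h1, h2] <;> split_ifs <;> simp_all
  · have hb : (c == 'S') = false := by simp [hc]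
    by_cases ha : PySem.Chars.isalpha c = true
    · have hd := pvAlpha_not_digit c ha
      cases next <;> simp [pvContrib, ha, hb, hd]
    · simp only [Bool.not_eq_true] at ha
      cases next <;> simp [pvContrib, ha, hb] <;> split_ifs <;> simp_all

lemma pvStep (pre : List Char) (c : Char) (cs : List Char) (acc : Int) :
    pvF (pre ++ c :: cs) acc ((pre.length : Int), c) = acc + pvContrib c cs.head? := by
  have hget : PySem.List.pyGet? (pre ++ c :: cs) ((pre.length : Int) + 1)
      = (c :: cs)[1]? := by
    have := PySem.List.pyGet?_append_right pre (c :: cs) 1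
    simpa using this
  cases cs with
  | nil =>
      simp [pvF, pvContrib, hget]
      split_ifs <;> ring
  | cons d cs' =>
      have hne : ((pre.length : Int) ≠ ↑pre.length + ((cs'.length : Int) + 1 + 1) - 1) := by omega
      simp [pvF, pvContrib, hget, List.length_append, hne]
      split_ifs <;> ring

lemma pvZipSum_cons (c : Char) (cs : List Char) :
    pvZipSum (c :: cs) = pvContrib c cs.head? + pvZipSum cs := by
  cases cs <;> simp [pvZipSum]

lemma pvLoopG (t : List Char) : ∀ (pre : List Char) (acc : Int),
    (PySem.List.enumerate t (pre.length : Int)).foldl (pvF (pre ++ t)) acc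
      = acc + pvZipSum t := by
  induction t with
  | nil => simp [pvZipSum]
  | cons c cs ih =>
      intro pre acc
      rw [PySem.List.enumerate_cons, List.foldl_cons, pvStep, pvZipSum_cons]
      have h := ih (pre ++ [c]) (acc + pvContrib c cs.head?)
      simp only [List.append_assoc, List.singleton_append, List.length_append,
        List.length_cons, List.length_nil, Nat.cast_add, Nat.cast_one,
        zero_add] at h
      rw [h]
      ring

lemma pvZipSum_counts (s : List Char) :
    pvZipSum s =
      (s.countP (fun c => PySem.Chars.isalpha c) : Int) +
      (s.countP (fun c => PySem.Chars.isdigit c) : Int) -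
      ((s.zip s.tail).countP (fun p => p.1 == 'S' && p.2 == '[') : Int) -
      ((s.zip s.tail).countP (fun p => PySem.Chars.isdigit p.1 && p.2 == '*') : Int) := by
  induction s with
  | nil => simp [pvZipSum]
  | cons c cs ih =>
      rw [pvZipSum_cons, ih, pvContrib_split]
      cases cs with
      | nil => simp [List.countP_cons]
      | cons d cs' =>
          simp only [List.tail_cons, List.zip_cons_cons, List.countP_cons, List.head?_cons]
          push_cast
          simp only [Option.some_beq_some]
          ring

-- ===== VERDICT (by name: the statement is the Claim_ definition above) =====
theorem P_load_spec : Claim_equal_P_load := by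
  intro string _
  unfold Spec_P_load
  have h := pvLoopG string.toList [] 0
  simp only [List.nil_append, List.length_nil, Nat.cast_zero, zero_add] at h
  have hA : P_load string
      = (PySem.List.enumerate string.toList 0).foldl (pvF string.toList) 0 := by
    simp only [P_load, PySem.Str.len_eq]
    rfl
  rw [hA, h, pvZipSum_counts, P_load_alt]
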